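-- pv_equiv track=rewrite | github.com/Mohamedibrahim-2002/Analyst_website | backend/app/services/swings.py | detect_swings
-- ===== SOURCE A (Python) =====
-- def detect_swings(curve, window=10):
--     highs = []
--     lows = []
--
--     for i in range(window, len(curve) - window):
--         if curve[i] is None:
--             continue
--
--         left = curve[i - window:i]
--         right = curve[i + 1:i + window]
--
--         if None in left or None in right:
--             continue
--
--         if curve[i] > max(left) and curve[i] > max(right):
--             highs.append((i, curve[i]))
--
--         if curve[i] < min(left) and curve[i] < min(right):
--             lows.append((i, curve[i]))
--
--     return highs, lows
-- ===== SOURCE B (Python) =====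
-- def _comb(a, b):
--     # blocker-aware (max, min) combine: None means "contains a gap"
--     if a is None or b is None:
--         return None
--     return (a[0] if a[0] > b[0] else b[0], a[1] if a[1] < b[1] else b[1])
--
--
-- def _build(vals, L):
--     # sparse-block scans for O(1) range aggregates over windows of length exactly L
--     n = len(vals)
--     pre = []
--     for i in range(n):
--         pre.append(vals[i] if i % L == 0 else _comb(pre[i - 1], vals[i]))
--     suf = [None] * n
--     for i in range(n - 1, -1, -1):
--         suf[i] = vals[i] if (i % L == L - 1 or i == n - 1) else _comb(vals[i], suf[i + 1])
--     return pre, suf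
--
--
-- def detect_swings(curve, window=10):
--     highs = []
--     lows = []
--     n = len(curve)
--     if window < 2 or n <= 2 * window:
--         return highs, lows
--     vals = [None if v is None else (v, v) for v in curve]
--     preL, sufL = _build(vals, window)
--     preR, sufR = _build(vals, window - 1)
--     for i in range(window, n - window):
--         v = curve[i]
--         if v is None:
--             continue
--         a = _comb(sufL[i - window], preL[i - 1])          # aggregate of curve[i-window:i]
--         b = _comb(sufR[i + 1], preR[i + window - 1])      # aggregate of curve[i+1:i+window]
--         if a is None or b is None:
--             continue
--         if v > a[0] and v > b[0]:
--             highs.append((i, v))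
--         if v < a[1] and v < b[1]:
--             lows.append((i, v))
--     return highs, lows
-- ===== Notes on version B (the rewrite author's own statement) =====
-- stated objective: alternative
-- what changed: A rescans a fresh window slice with max()/min() and a None membership test for every index; B builds sparse-block prefix/suffix (max, min, gap) aggregates once per window length and answers each window query by combining two precomputed entries.
-- outside the precondition, e.g. on detect_swings([None, None, None], 1): A returns ([], []), B returns ([], [])
import Mathlib
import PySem

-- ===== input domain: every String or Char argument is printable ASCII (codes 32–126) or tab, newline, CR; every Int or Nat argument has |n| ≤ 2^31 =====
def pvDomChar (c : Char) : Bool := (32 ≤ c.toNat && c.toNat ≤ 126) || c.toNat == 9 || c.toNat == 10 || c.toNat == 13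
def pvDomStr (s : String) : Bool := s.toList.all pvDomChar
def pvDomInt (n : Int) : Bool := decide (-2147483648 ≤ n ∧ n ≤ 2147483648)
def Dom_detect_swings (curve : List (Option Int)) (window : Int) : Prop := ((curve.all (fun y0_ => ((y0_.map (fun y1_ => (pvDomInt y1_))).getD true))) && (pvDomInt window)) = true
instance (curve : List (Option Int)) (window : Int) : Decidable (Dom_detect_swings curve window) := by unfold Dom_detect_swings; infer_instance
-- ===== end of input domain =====

-- B replaces A's per-index window rescans (slice + max()/min() + None test) by sparse-block
-- prefix/suffix (max, min, gap) aggregates built once and queried per index (objective: alternative).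

-- ===== PORT A =====
def detect_swings (curve : List (Option Int)) (window : Int) : (List (Int × Int)) × (List (Int × Int)) :=
  (PySem.List.pyRange window ((curve.length : Int) - window) 1).foldl
    (fun acc i =>
      match PySem.List.pyGet? curve i with
      | none => acc            -- IndexError (unreachable inside Pre_)
      | some none => acc       -- curve[i] is None: continue
      | some (some v) =>
        let left := PySem.List.slice curve (some (i - window)) (some i)
        let right := PySem.List.slice curve (some (i + 1)) (some (i + window))
        if none ∈ left ∨ none ∈ right then acc
        else
          -- left/right are None-free here, so Python's max/min act on their int values
          match PySem.List.max? left.reduceOption id, PySem.List.max? right.reduceOption id,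
                PySem.List.min? left.reduceOption id, PySem.List.min? right.reduceOption id with
          | some ml, some mr, some nl, some nr =>
            let acc1 := if ml < v ∧ mr < v then (acc.1 ++ [(i, v)], acc.2) else acc
            if v < nl ∧ v < nr then (acc1.1, acc1.2 ++ [(i, v)]) else acc1
          | _, _, _, _ => acc  -- max()/min() of an empty slice raises ValueError: excluded by Pre_
    ) ([], [])

-- ===== PORT B =====
-- blocker-aware (max, min) combine: none means "contains a gap"
def pvComb (x y : Option (Int × Int)) : Option (Int × Int) :=
  x.elim none (fun a => y.elim none (fun b =>
    some (if a.1 > b.1 then a.1 else b.1, if a.2 < b.2 then a.2 else b.2)))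

-- Source B's `pre` scan (loop index i and pre[i-1] carried through; indices are Nats: the loop runs i = 0..n-1)
def pvPre (L : Nat) : List (Option (Int × Int)) → Nat → Option (Int × Int) → List (Option (Int × Int))
  | [], _, _ => []
  | v :: rest, i, prev =>
    let cur := if i % L = 0 then v else pvComb prev v
    cur :: pvPre L rest (i + 1) cur

-- Source B's `suf` scan (computed right-to-left: the tail is suf[i+1..]; `rest.isEmpty` is Python's `i == n - 1`)
def pvSuf (L : Nat) : List (Option (Int × Int)) → Nat → List (Option (Int × Int))
  | [], _ => []
  | v :: rest, i =>
    let tail := pvSuf L rest (i + 1)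
    (if i % L = L - 1 ∨ rest.isEmpty then v else pvComb v (tail.headD none)) :: tail

def detect_swings_alt (curve : List (Option Int)) (window : Int) : (List (Int × Int)) × (List (Int × Int)) :=
  let n : Int := curve.length
  if window < 2 ∨ n ≤ 2 * window then ([], [])
  else
    let vals := curve.map (fun v => v.map (fun x => (x, x)))
    let w := window.toNat
    let preL := pvPre w vals 0 none
    let sufL := pvSuf w vals 0
    let preR := pvPre (w - 1) vals 0 none
    let sufR := pvSuf (w - 1) vals 0
    (PySem.List.pyRange window (n - window) 1).foldl
      (fun acc i =>
        -- v = curve[i] (always in range here); a None value means `continue`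
        (PySem.List.pyGet? curve i).elim acc (fun ov => ov.elim acc (fun v =>
            -- all indices below are in range: window ≤ i < n - window
            let a := pvComb (sufL.getD (i - window).toNat none) (preL.getD (i - 1).toNat none)
            let b := pvComb (sufR.getD (i + 1).toNat none) (preR.getD (i + window - 1).toNat none)
            -- `if a is None or b is None: continue`
            a.elim acc (fun a => b.elim acc (fun b =>
              let acc1 := if a.1 < v ∧ b.1 < v then (acc.1 ++ [(i, v)], acc.2) else acc
              if v < a.2 ∧ v < b.2 then (acc1.1, acc1.2 ++ [(i, v)]) else acc1))))
      ) ([], [])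

-- ===== PRECONDITION & SPEC =====
-- Pre_ excludes window < 2 with a nonempty index range: there Python's max()/min() on an empty
-- slice raises ValueError (or a negative window raises IndexError), except on data whose None
-- gaps happen to skip every index, where A returns ([], []).
def Pre_detect_swings (curve : List (Option Int)) (window : Int) : Prop :=
  2 ≤ window ∨ (curve.length : Int) ≤ 2 * window
instance (curve : List (Option Int)) (window : Int) : Decidable (Pre_detect_swings curve window) := by
  unfold Pre_detect_swings; infer_instance

def pvWitness_detect_swings : List (Option Int) × Int := ([some 0, some 1, some 5, some 1, some 0], 2)

def Spec_detect_swings (curve : List (Option Int)) (window : Int) (out : (List (Int × Int)) × (List (Int × Int))) : Prop := out = detect_swings_alt curve window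
instance (curve : List (Option Int)) (window : Int) (out : (List (Int × Int)) × (List (Int × Int))) : Decidable (Spec_detect_swings curve window out) := by unfold Spec_detect_swings; infer_instance

-- ===== CLAIM (what is proved, stated in full; the proofs are below) =====
def Claim_equal_detect_swings : Prop := ∀ (curve : List (Option Int)) (window : Int), Dom_detect_swings curve window → Pre_detect_swings curve window → Spec_detect_swings curve window (detect_swings curve window)

-- ===== LEMMAS AND PROOFS =====
-- encoding of a curve point as a (max, min) seed
def pvEnc (v : Option Int) : Option (Int × Int) := v.map (fun x => (x, x))

-- aggregate of a nonempty list ([] maps to none; only used on nonempty segments)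
def pvCl : List (Option (Int × Int)) → Option (Int × Int)
  | [] => none
  | x :: xs => xs.foldl pvComb x

-- the segment vals[a..b] (inclusive)
def pvSeg (vals : List (Option (Int × Int))) (a b : Nat) : List (Option (Int × Int)) :=
  (vals.drop a).take (b + 1 - a)

theorem pvComb_none_left (y : Option (Int × Int)) : pvComb none y = none := by cases y <;> rfl

theorem pvComb_some (a b : Int × Int) :
    pvComb (some a) (some b) = some (max a.1 b.1, min a.2 b.2) := by
  simp only [pvComb, Option.elim_some, max_def, min_def, Option.some.injEq, Prod.mk.injEq]
  constructor <;> split_ifs <;> omega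

theorem pvComb_assoc (x y z : Option (Int × Int)) :
    pvComb (pvComb x y) z = pvComb x (pvComb y z) := by
  cases x <;> cases y <;> cases z <;>
    simp only [pvComb, Option.elim_some, Option.elim_none, Option.some.injEq, Prod.mk.injEq] <;>
    try (constructor <;> split_ifs <;> omega)

theorem pvComb_idem (x : Option (Int × Int)) : pvComb x x = x := by
  cases x <;> simp [pvComb]

theorem foldl_pvComb_none (l : List (Option (Int × Int))) : l.foldl pvComb none = none := by
  induction l with
  | nil => rfl
  | cons x xs ih => simpa [pvComb_none_left] using ih

theorem pvCl_foldl (ys : List (Option (Int × Int))) (h : ys ≠ []) (a : Option (Int × Int)) :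
    ys.foldl pvComb a = pvComb a (pvCl ys) := by
  induction ys generalizing a with
  | nil => exact absurd rfl h
  | cons y ys ih =>
    by_cases hy : ys = []
    · subst hy; rfl
    · simp only [List.foldl_cons, ih hy, pvCl, pvComb_assoc]

theorem pvCl_append (xs ys : List (Option (Int × Int))) (hx : xs ≠ []) (hy : ys ≠ []) :
    pvCl (xs ++ ys) = pvComb (pvCl xs) (pvCl ys) := by
  cases xs with
  | nil => exact absurd rfl hx
  | cons x xs =>
    simp only [pvCl, List.cons_append, List.foldl_append]
    exact pvCl_foldl ys hy _

theorem pvCl_cons (x : Option (Int × Int)) (ys : List (Option (Int × Int))) (hy : ys ≠ []) :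
    pvCl (x :: ys) = pvComb x (pvCl ys) := pvCl_foldl ys hy x

theorem pvSeg_single (vals : List (Option (Int × Int))) (i : Nat) (hi : i < vals.length) :
    pvSeg vals i i = [vals.getD i none] := by
  unfold pvSeg
  rw [List.drop_eq_getElem_cons hi]
  have h1 : i + 1 - i = 1 := by omega
  rw [h1, List.take_succ_cons, List.take_zero, List.getD_eq_getElem _ _ hi]

theorem pvSeg_ne_nil (vals : List (Option (Int × Int))) (a b : Nat)
    (h1 : a ≤ b) (h2 : a < vals.length) : pvSeg vals a b ≠ [] := by
  have : 0 < (pvSeg vals a b).length := by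
    simp only [pvSeg, List.length_take, List.length_drop]
    omega
  exact List.ne_nil_of_length_pos this

theorem pvSeg_append (vals : List (Option (Int × Int))) (a m c : Nat)
    (h1 : a ≤ m + 1) (h2 : m ≤ c) :
    pvSeg vals a c = pvSeg vals a m ++ pvSeg vals (m + 1) c := by
  unfold pvSeg
  have h3 : c + 1 - a = (m + 1 - a) + (c - m) := by omega
  rw [h3, List.take_add]
  congr 1
  rw [List.drop_drop]
  have h4 : a + (m + 1 - a) = m + 1 := by omega
  have h5 : c - m = c + 1 - (m + 1) := by omega
  rw [h4, h5]

-- reference per-index values of the two scans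
def pvRefPre (L : Nat) (vals : List (Option (Int × Int))) : Nat → Option (Int × Int)
  | 0 => vals.getD 0 none
  | (i + 1) =>
    if (i + 1) % L = 0 then vals.getD (i + 1) none
    else pvComb (pvRefPre L vals i) (vals.getD (i + 1) none)

def pvRefSuf (L : Nat) (vals : List (Option (Int × Int))) (i : Nat) : Option (Int × Int) :=
  if i % L = L - 1 ∨ vals.length ≤ i + 1 then vals.getD i none
  else pvComb (vals.getD i none) (pvRefSuf L vals (i + 1))
termination_by vals.length - i
decreasing_by omega

theorem pvPre_link (L : Nat) (vals : List (Option (Int × Int))) :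
    ∀ (rest : List (Option (Int × Int))) (i : Nat) (prev : Option (Int × Int)),
      rest = vals.drop i →
      (i % L ≠ 0 → prev = pvRefPre L vals (i - 1)) →
      pvPre L rest i prev = (List.range rest.length).map (fun j => pvRefPre L vals (i + j)) := by
  intro rest
  induction rest with
  | nil => intro i prev _ _; rfl
  | cons v rest ih =>
    intro i prev hdrop hprev
    have hvi : vals[i]? = some v := by
      have h0 : (List.drop i vals)[0]? = vals[i + 0]? := List.getElem?_drop
      rw [← hdrop] at h0; simpa using h0.symm
    have hrest : rest = vals.drop (i + 1) := by
      have h0 : (vals.drop i).drop 1 = vals.drop (i + 1) := by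
        rw [List.drop_drop]
      rw [← hdrop] at h0; simpa using h0
    have hcur : (if i % L = 0 then v else pvComb prev v) = pvRefPre L vals i := by
      cases i with
      | zero => simp [pvRefPre, List.getD, hvi]
      | succ k =>
        by_cases h : (k + 1) % L = 0
        · simp [pvRefPre, h, List.getD, hvi]
        · simp [pvRefPre, h, List.getD, hvi, hprev h]
    simp only [pvPre, hcur]
    rw [ih (i + 1) (pvRefPre L vals i) hrest (fun _ => rfl)]
    rw [List.length_cons, List.range_succ_eq_map, List.map_cons, List.map_map]
    refine congrArg₂ List.cons (by simp) ?_
    refine List.map_congr_left (fun j _ => ?_)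
    simp only [Function.comp_apply]
    congr 1
    omega

theorem pvSuf_link (L : Nat) (vals : List (Option (Int × Int))) :
    ∀ (rest : List (Option (Int × Int))) (i : Nat),
      rest = vals.drop i →
      pvSuf L rest i = (List.range rest.length).map (fun j => pvRefSuf L vals (i + j)) := by
  intro rest
  induction rest with
  | nil => intro i _; rfl
  | cons v rest ih =>
    intro i hdrop
    have hvi : vals[i]? = some v := by
      have h0 : (List.drop i vals)[0]? = vals[i + 0]? := List.getElem?_drop
      rw [← hdrop] at h0; simpa using h0.symm
    have hrest : rest = vals.drop (i + 1) := by
      have h0 : (vals.drop i).drop 1 = vals.drop (i + 1) := by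
        rw [List.drop_drop]
      rw [← hdrop] at h0; simpa using h0
    have hlen : vals.length = i + 1 + rest.length := by
      have h0 := congrArg List.length hdrop
      simp only [List.length_cons, List.length_drop] at h0
      omega
    have hempty : (rest.isEmpty = true) ↔ vals.length ≤ i + 1 := by
      rw [List.isEmpty_iff]
      constructor
      · intro h0; rw [h0] at hlen; simp at hlen; omega
      · intro h0
        have h1 : rest.length = 0 := by omega
        exact List.eq_nil_of_length_eq_zero h1
    simp only [pvSuf]
    rw [ih (i + 1) hrest]
    have hcur : (if i % L = L - 1 ∨ rest.isEmpty = true then v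
        else pvComb v (((List.range rest.length).map fun j => pvRefSuf L vals (i + 1 + j)).headD none))
        = pvRefSuf L vals i := by
      rw [pvRefSuf]
      by_cases hc : i % L = L - 1 ∨ vals.length ≤ i + 1
      · rw [if_pos (by rwa [hempty]), if_pos hc]
        simp [List.getD, hvi]
      · rw [if_neg (by rwa [hempty]), if_neg hc]
        have hrne : rest ≠ [] := by
          intro h0
          rw [h0] at hlen
          exact hc (Or.inr (by simp at hlen; omega))
        obtain ⟨r0, rest', hr⟩ := List.exists_cons_of_ne_nil hrne
        rw [hr]
        simp only [List.length_cons, List.range_succ_eq_map, List.map_cons, List.headD_cons]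
        simp [List.getD, hvi]
    rw [hcur]
    rw [List.length_cons, List.range_succ_eq_map, List.map_cons, List.map_map]
    refine congrArg₂ List.cons (by simp) ?_
    refine List.map_congr_left (fun j _ => ?_)
    simp only [Function.comp_apply]
    congr 1
    omega

theorem pvRefPre_spec (L : Nat) (hL : 0 < L) (vals : List (Option (Int × Int))) :
    ∀ (i : Nat), i < vals.length → pvRefPre L vals i = pvCl (pvSeg vals (i - i % L) i) := by
  intro i
  induction i with
  | zero =>
    intro hi
    rw [pvRefPre, Nat.zero_mod, Nat.sub_zero, pvSeg_single vals 0 hi]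
    rfl
  | succ k ih =>
    intro hi
    by_cases h : (k + 1) % L = 0
    · rw [pvRefPre, if_pos h, h, Nat.sub_zero, pvSeg_single vals (k + 1) hi]
      rfl
    · have hk1 : k < vals.length := lt_of_le_of_lt (Nat.le_succ k) hi
      have hr : 0 < (k + 1) % L := Nat.pos_of_ne_zero h
      have hlt : (k + 1) % L < L := Nat.mod_lt _ hL
      have hmod : k % L = (k + 1) % L - 1 := by
        have hd := Nat.div_add_mod (k + 1) L
        have hcm : L * ((k + 1) / L) = ((k + 1) / L) * L := Nat.mul_comm _ _
        have he : k = ((k + 1) % L - 1) + ((k + 1) / L) * L := by omega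
        conv_lhs => rw [he]
        rw [Nat.add_mul_mod_self_right, Nat.mod_eq_of_lt (by omega)]
      have hmk : k % L ≤ k := Nat.mod_le _ _
      have hbs : k - k % L = (k + 1) - (k + 1) % L := by omega
      rw [pvRefPre, if_neg h, ih hk1, hbs]
      set b := (k + 1) - (k + 1) % L with hb
      have hble : b ≤ k := by omega
      have hne : pvSeg vals b k ≠ [] := pvSeg_ne_nil vals b k hble (by omega)
      have hseg : pvSeg vals b (k + 1) = pvSeg vals b k ++ [vals.getD (k + 1) none] := by
        unfold pvSeg
        have h2 : (k + 1) + 1 - b = (k + 1 - b) + 1 := by omega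
        rw [h2, List.take_succ]
        congr 1
        rw [List.getElem?_drop]
        have h3 : b + (k + 1 - b) = k + 1 := by omega
        rw [h3, List.getElem?_eq_getElem hi]
        simp [List.getD, List.getElem?_eq_getElem hi]
      rw [hseg, pvCl_append _ _ hne (by simp)]
      rfl

theorem pvRefSuf_spec (L : Nat) (hL : 0 < L) (vals : List (Option (Int × Int))) :
    ∀ (i : Nat), i < vals.length →
      pvRefSuf L vals i = pvCl (pvSeg vals i (min (i - i % L + L - 1) (vals.length - 1))) := by
  have main : ∀ (d i : Nat), vals.length - i ≤ d → i < vals.length →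
      pvRefSuf L vals i = pvCl (pvSeg vals i (min (i - i % L + L - 1) (vals.length - 1))) := by
    intro d
    induction d with
    | zero => intro i hd hi; omega
    | succ d ih =>
      intro i hd hi
      have hml : i % L < L := Nat.mod_lt _ hL
      have hmi : i % L ≤ i := Nat.mod_le _ _
      rw [pvRefSuf]
      by_cases hc : i % L = L - 1 ∨ vals.length ≤ i + 1
      · rw [if_pos hc]
        have hmin : min (i - i % L + L - 1) (vals.length - 1) = i := by
          rcases hc with h | h <;> omega
        rw [hmin, pvSeg_single vals i hi]
        rfl
      · rw [if_neg hc]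
        push_neg at hc
        obtain ⟨h1, h2⟩ := hc
        have hrec := ih (i + 1) (by omega) (by omega)
        have hmod : (i + 1) % L = i % L + 1 := by
          have hd' := Nat.div_add_mod i L
          have hcm : L * (i / L) = (i / L) * L := Nat.mul_comm _ _
          have he : i + 1 = (i % L + 1) + (i / L) * L := by omega
          conv_lhs => rw [he]
          rw [Nat.add_mul_mod_self_right, Nat.mod_eq_of_lt (by omega)]
        have hbs : (i + 1) - (i + 1) % L + L - 1 = i - i % L + L - 1 := by omega
        rw [hrec, hbs]
        set E := min (i - i % L + L - 1) (vals.length - 1) with hE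
        have hEi : i + 1 ≤ E := by omega
        have hEn : E ≤ vals.length - 1 := by omega
        have hcons : pvSeg vals i E = vals.getD i none :: pvSeg vals (i + 1) E := by
          unfold pvSeg
          rw [List.drop_eq_getElem_cons hi]
          have h3 : E + 1 - i = (E + 1 - (i + 1)) + 1 := by omega
          rw [h3, List.take_succ_cons, List.getD_eq_getElem _ _ hi]
        rw [hcons, pvCl_cons _ _ (pvSeg_ne_nil vals (i + 1) E (by omega) (by omega))]
  intro i hi
  exact main (vals.length - i) i (le_refl _) hi

theorem pvQuery (L : Nat) (hL : 0 < L) (vals : List (Option (Int × Int))) (l : Nat)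
    (h : l + L ≤ vals.length) :
    pvComb (pvRefSuf L vals l) (pvRefPre L vals (l + L - 1)) = pvCl (pvSeg vals l (l + L - 1)) := by
  have hml : l % L < L := Nat.mod_lt _ hL
  have hmi : l % L ≤ l := Nat.mod_le _ _
  have hl1 : l < vals.length := by omega
  have hl2 : l + L - 1 < vals.length := by omega
  have hd : l / L * L + l % L = l := by
    have := Nat.div_add_mod l L
    have hcm : L * (l / L) = (l / L) * L := Nat.mul_comm _ _
    omega
  rw [pvRefSuf_spec L hL vals l hl1, pvRefPre_spec L hL vals (l + L - 1) hl2]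
  by_cases h0 : l % L = 0
  · have hmod2 : (l + L - 1) % L = L - 1 := by
      have he2 : l + L - 1 = (L - 1) + (l / L) * L := by omega
      rw [he2, Nat.add_mul_mod_self_right, Nat.mod_eq_of_lt (by omega)]
    have hmin : min (l - l % L + L - 1) (vals.length - 1) = l + L - 1 := by omega
    have hbs : (l + L - 1) - (l + L - 1) % L = l := by omega
    rw [hmod2] at hbs
    rw [hmin, hmod2, hbs]
    exact pvComb_idem _
  · have hr : 0 < l % L := Nat.pos_of_ne_zero h0
    have hmod2 : (l + L - 1) % L = l % L - 1 := by
      have hmul : (l / L + 1) * L = l / L * L + L := by ring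
      have he : l + L - 1 = (l % L - 1) + (l / L + 1) * L := by omega
      rw [he, Nat.add_mul_mod_self_right, Nat.mod_eq_of_lt (by omega)]
    set m := l - l % L + L - 1 with hm
    have hmin : min m (vals.length - 1) = m := by omega
    have hbs : (l + L - 1) - (l + L - 1) % L = m + 1 := by
      rw [hmod2]; omega
    rw [hmin, hbs]
    rw [pvSeg_append vals l m (l + L - 1) (by omega) (by omega)]
    exact (pvCl_append _ _ (pvSeg_ne_nil vals l m (by omega) hl1)
      (pvSeg_ne_nil vals (m + 1) (l + L - 1) (by omega) (by omega))).symm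

theorem foldl_pvComb_enc (ls : List (Option Int)) :
    ∀ (a b : Int),
      (ls.map pvEnc).foldl pvComb (some (a, b)) =
        if none ∈ ls then none
        else some (ls.reduceOption.foldl max a, ls.reduceOption.foldl min b) := by
  induction ls with
  | nil => intro a b; simp
  | cons x ls ih =>
    intro a b
    cases x with
    | none =>
      simp only [List.map_cons, List.foldl_cons, pvEnc, Option.map_none]
      have hstep : pvComb (some (a, b)) none = none := rfl
      rw [hstep, foldl_pvComb_none]
      simp
    | some v =>
      simp only [List.map_cons, List.foldl_cons, pvEnc, Option.map_some]
      have hstep : pvComb (some (a, b)) (some (v, v)) = some (max a v, min b v) :=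
        pvComb_some (a, b) (v, v)
      rw [hstep, ih]
      simp [List.reduceOption_cons_of_some]

theorem max?_cons_eq (v : Int) (vs : List Int) :
    PySem.List.max? (v :: vs) id = some (vs.foldl max v) := by
  induction vs generalizing v with
  | nil => rfl
  | cons x l ih =>
    have hinit : PySem.List.max? (v :: x :: l) id = PySem.List.max? (max v x :: l) id := by
      simp only [PySem.List.max?, List.foldl_cons]
      congr 1
      by_cases h : v < x
      · simp [h, max_eq_right h.le]
      · simp [h, max_eq_left (not_lt.mp h)]
    rw [hinit, ih, List.foldl_cons]

theorem min?_cons_eq (v : Int) (vs : List Int) :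
    PySem.List.min? (v :: vs) id = some (vs.foldl min v) := by
  induction vs generalizing v with
  | nil => rfl
  | cons x l ih =>
    have hinit : PySem.List.min? (v :: x :: l) id = PySem.List.min? (min v x :: l) id := by
      simp only [PySem.List.min?, List.foldl_cons]
      congr 1
      by_cases h : x < v
      · simp [h, min_eq_right h.le]
      · simp [h, min_eq_left (not_lt.mp h)]
    rw [hinit, ih, List.foldl_cons]

theorem pvCl_slice (ls : List (Option Int)) (h : ls ≠ []) :
    pvCl (ls.map pvEnc) =
      if none ∈ ls then none
      else some (((PySem.List.max? ls.reduceOption id).getD 0,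
                  (PySem.List.min? ls.reduceOption id).getD 0)) := by
  cases ls with
  | nil => exact absurd rfl h
  | cons x rest =>
    cases x with
    | none =>
      simp only [List.map_cons, pvEnc, Option.map_none, pvCl]
      rw [foldl_pvComb_none]
      simp
    | some v =>
      simp only [List.map_cons, pvEnc, Option.map_some, pvCl]
      rw [foldl_pvComb_enc rest v v]
      simp only [List.mem_cons, reduceCtorEq, false_or, List.reduceOption_cons_of_some]
      rw [max?_cons_eq, min?_cons_eq]
      by_cases hn : none ∈ rest <;> simp [hn]

theorem getD_map_range' {α : Type} (f : Nat → α) (n j : Nat) (d : α) (h : j < n) :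
    ((List.range n).map f).getD j d = f j := by
  simp [List.getD, List.getElem?_map, List.getElem?_range, h]

-- ===== VERDICT (by name: the statement is the Claim_ definition above) =====
theorem detect_swings_spec : Claim_equal_detect_swings := by
  intro curve window _ hpre
  unfold Spec_detect_swings
  by_cases hsmall : (curve.length : Int) ≤ 2 * window
  · simp only [detect_swings, detect_swings_alt]
    rw [if_pos (Or.inr hsmall), PySem.List.pyRange_one_eq_nil (by omega)]
    rfl
  · have hw : (2 : Int) ≤ window := hpre.resolve_right hsmall
    simp only [detect_swings, detect_swings_alt]
    rw [if_neg (by push_neg; constructor <;> omega)]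
    apply PySem.List.foldl_congr_mem
    intro acc i hi
    rw [PySem.List.mem_pyRange_one] at hi
    obtain ⟨hi1, hi2⟩ := hi
    have h0i : 0 ≤ i := by omega
    have hik : i = ((i.toNat : Nat) : Int) := (Int.toNat_of_nonneg h0i).symm
    set k := i.toNat with hk
    have hwk : window = ((window.toNat : Nat) : Int) := (Int.toNat_of_nonneg (by omega)).symm
    set w := window.toNat with hw'
    have hw2 : 2 ≤ w := by omega
    have hkw : w ≤ k := by omega
    have hkN : k + w < curve.length := by omega
    cases hget : PySem.List.pyGet? curve i with
    | none => rfl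
    | some ov =>
      cases ov with
      | none => rfl
      | some v =>
        dsimp only [Option.elim]
        rw [show (curve.map (fun v => v.map (fun x => (x, x)))) = List.map pvEnc curve from rfl]
        have hlenv : (List.map pvEnc curve).length = curve.length := by simp
        have esufL : (pvSuf w (List.map pvEnc curve) 0).getD (i - window).toNat none
            = pvRefSuf w (List.map pvEnc curve) (k - w) := by
          rw [pvSuf_link w (List.map pvEnc curve) (List.map pvEnc curve) 0 (by rw [List.drop_zero])]
          have h1 : (i - window).toNat = k - w := by omega
          rw [h1]
          rw [getD_map_range' _ _ _ _ (by rw [hlenv]; omega)]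
          norm_num
        have epreL : (pvPre w (List.map pvEnc curve) 0 none).getD (i - 1).toNat none
            = pvRefPre w (List.map pvEnc curve) (k - 1) := by
          rw [pvPre_link w (List.map pvEnc curve) (List.map pvEnc curve) 0 none
            (by rw [List.drop_zero]) (fun h => absurd (Nat.zero_mod w) h)]
          have h1 : (i - 1).toNat = k - 1 := by omega
          rw [h1]
          rw [getD_map_range' _ _ _ _ (by rw [hlenv]; omega)]
          norm_num
        have esufR : (pvSuf (w - 1) (List.map pvEnc curve) 0).getD (i + 1).toNat none
            = pvRefSuf (w - 1) (List.map pvEnc curve) (k + 1) := by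
          rw [pvSuf_link (w - 1) (List.map pvEnc curve) (List.map pvEnc curve) 0 (by rw [List.drop_zero])]
          have h1 : (i + 1).toNat = k + 1 := by omega
          rw [h1]
          rw [getD_map_range' _ _ _ _ (by rw [hlenv]; omega)]
          norm_num
        have epreR : (pvPre (w - 1) (List.map pvEnc curve) 0 none).getD (i + window - 1).toNat none
            = pvRefPre (w - 1) (List.map pvEnc curve) (k + w - 1) := by
          rw [pvPre_link (w - 1) (List.map pvEnc curve) (List.map pvEnc curve) 0 none
            (by rw [List.drop_zero]) (fun h => absurd (Nat.zero_mod (w - 1)) h)]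
          have h1 : (i + window - 1).toNat = k + w - 1 := by omega
          rw [h1]
          rw [getD_map_range' _ _ _ _ (by rw [hlenv]; omega)]
          norm_num
        have ha : pvComb (pvRefSuf w (List.map pvEnc curve) (k - w))
              (pvRefPre w (List.map pvEnc curve) (k - 1))
            = pvCl (pvSeg (List.map pvEnc curve) (k - w) (k - 1)) := by
          have hq := pvQuery w (by omega) (List.map pvEnc curve) (k - w) (by rw [hlenv]; omega)
          have h1 : k - w + w - 1 = k - 1 := by omega
          rwa [h1] at hq
        have hb : pvComb (pvRefSuf (w - 1) (List.map pvEnc curve) (k + 1))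
              (pvRefPre (w - 1) (List.map pvEnc curve) (k + w - 1))
            = pvCl (pvSeg (List.map pvEnc curve) (k + 1) (k + w - 1)) := by
          have hq := pvQuery (w - 1) (by omega) (List.map pvEnc curve) (k + 1) (by rw [hlenv]; omega)
          have h1 : k + 1 + (w - 1) - 1 = k + w - 1 := by omega
          have h2 : k + 1 + (w - 1) = k + w := by omega
          rw [h1] at hq
          exact hq
        have hleft : pvSeg (List.map pvEnc curve) (k - w) (k - 1)
            = (PySem.List.slice curve (some (i - window)) (some i)).map pvEnc := by
          have h1 : i - window = (((k - w : Nat)) : Int) := by omega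
          rw [h1, hik, PySem.List.slice_natCast]
          unfold pvSeg
          rw [List.map_take, List.map_drop]
          congr 1
          omega
        have hright : pvSeg (List.map pvEnc curve) (k + 1) (k + w - 1)
            = (PySem.List.slice curve (some (i + 1)) (some (i + window))).map pvEnc := by
          have h1 : i + 1 = (((k + 1 : Nat)) : Int) := by omega
          have h2 : i + window = (((k + w : Nat)) : Int) := by omega
          rw [h1, h2, PySem.List.slice_natCast]
          unfold pvSeg
          rw [List.map_take, List.map_drop]
          congr 1
          omega
        have hlne : PySem.List.slice curve (some (i - window)) (some i) ≠ [] := by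
          have h1 : i - window = (((k - w : Nat)) : Int) := by omega
          rw [h1, hik, PySem.List.slice_natCast]
          apply List.ne_nil_of_length_pos
          simp only [List.length_take, List.length_drop]
          omega
        have hrne : PySem.List.slice curve (some (i + 1)) (some (i + window)) ≠ [] := by
          have h1 : i + 1 = (((k + 1 : Nat)) : Int) := by omega
          have h2 : i + window = (((k + w : Nat)) : Int) := by omega
          rw [h1, h2, PySem.List.slice_natCast]
          apply List.ne_nil_of_length_pos
          simp only [List.length_take, List.length_drop]
          omega
        rw [esufL, epreL, esufR, epreR, ha, hb, hleft, hright,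
            pvCl_slice _ hlne, pvCl_slice _ hrne]
        by_cases hnl : none ∈ PySem.List.slice curve (some (i - window)) (some i)
        · simp [hnl]
        · by_cases hnr : none ∈ PySem.List.slice curve (some (i + 1)) (some (i + window))
          · simp [hnl, hnr]
          · have hredl : (PySem.List.slice curve (some (i - window)) (some i)).reduceOption ≠ [] := by
              rw [Ne, List.reduceOption_eq_nil_iff]
              rintro ⟨n, hrep⟩
              rw [hrep] at hlne
              have hn : n ≠ 0 := by intro h0; rw [h0] at hlne; simp at hlne
              exact hnl (by rw [hrep]; simp [List.mem_replicate, hn])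
            have hredr : (PySem.List.slice curve (some (i + 1)) (some (i + window))).reduceOption ≠ [] := by
              rw [Ne, List.reduceOption_eq_nil_iff]
              rintro ⟨n, hrep⟩
              rw [hrep] at hrne
              have hn : n ≠ 0 := by intro h0; rw [h0] at hrne; simp at hrne
              exact hnr (by rw [hrep]; simp [List.mem_replicate, hn])
            obtain ⟨xl, xsl, hxl⟩ := List.exists_cons_of_ne_nil hredl
            obtain ⟨xr, xsr, hxr⟩ := List.exists_cons_of_ne_nil hredr
            rw [hxl, hxr, max?_cons_eq, min?_cons_eq, max?_cons_eq, min?_cons_eq]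
            simp [hnl, hnr]
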